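-- pv_equiv track=rewrite | github.com/gonglini/practice | programmers/keyboard.py | solution
-- ===== SOURCE A (Python) =====
-- def solution(keymap, targets):
--     answer = []
--     for word in targets :
--
--         if len(set(word) - set(list(''.join(keymap)))) :
--             answer.append(-1)
--
--         else :
--             cnt = 0
--             for w in word :
--                 get_cnt = min([key.index(w)+1 for key in keymap if w in key])
--                 cnt += get_cnt
--             answer.append(cnt)
--     return answer
-- ===== SOURCE B (Python) =====
-- def solution(keymap, targets):
--     # Build once: minimal keystrokes per character over all keys.
--     cost = {}
--     for key in keymap:
--         for i, c in enumerate(key):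
--             v = i + 1
--             if c not in cost or v < cost[c]:
--                 cost[c] = v
--     answer = []
--     for word in targets:
--         total = 0
--         for c in word:
--             t = cost.get(c)
--             if t is None:
--                 total = -1
--                 break
--             total += t
--         answer.append(total)
--     return answer
-- ===== Notes on version B (the rewrite author's own statement) =====
-- stated objective: faster
-- what changed: B precomputes one dict of minimal keystroke cost per character in a single scan of keymap, then scores each word in one fused pass (missing char -> -1), replacing A's per-word set-difference feasibility pass plus per-character rescans of every key.
import Mathlib
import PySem

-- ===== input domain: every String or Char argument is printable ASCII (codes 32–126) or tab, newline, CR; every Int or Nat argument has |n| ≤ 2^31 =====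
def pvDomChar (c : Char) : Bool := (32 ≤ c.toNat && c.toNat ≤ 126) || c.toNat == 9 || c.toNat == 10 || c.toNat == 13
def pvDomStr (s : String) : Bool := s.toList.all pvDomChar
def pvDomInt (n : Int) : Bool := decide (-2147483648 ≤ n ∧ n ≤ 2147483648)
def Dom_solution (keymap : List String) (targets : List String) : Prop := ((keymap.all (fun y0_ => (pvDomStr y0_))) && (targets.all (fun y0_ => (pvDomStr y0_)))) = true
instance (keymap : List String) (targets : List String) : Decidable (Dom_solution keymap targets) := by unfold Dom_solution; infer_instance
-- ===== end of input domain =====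

-- B builds one character→min-cost dict in a single scan of keymap and scores each word in one
-- fused pass (missing char → -1), replacing A's per-word set-difference pass + per-char key rescans.

-- ===== PORT A =====
def solution (keymap : List String) (targets : List String) : List Int :=
  targets.foldl (fun answer word =>
    -- if len(set(word) - set(list(''.join(keymap)))) :
    if PySem.Set.len (PySem.Set.diff (PySem.Set.ofList word.toList)
        (PySem.Set.ofList (PySem.Str.join "" keymap).toList)) ≠ 0 then
      answer ++ [(-1 : Int)]
    else
      -- cnt = 0; for w in word: cnt += min([key.index(w)+1 for key in keymap if w in key])
      answer ++ [word.toList.foldl (fun cnt w =>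
        -- Python's min raises on []; unreachable in this branch (w occurs in some key), .getD 0 is never used
        cnt + (PySem.List.min?
          ((keymap.filter (fun key => key.toList.contains w)).map
            (fun key => ((PySem.List.index? key.toList w).getD 0 : Int) + 1))
          (fun x => x)).getD 0) 0]) []

-- ===== PORT B =====
-- cost = {}; for key in keymap: for i, c in enumerate(key): v = i+1; if c not in cost or v < cost[c]: cost[c] = v
def buildCost (keymap : List String) : PySem.Dict Char Int :=
  keymap.foldl (fun d key =>
    (PySem.List.enumerate key.toList 0).foldl (fun d p =>
      let v : Int := p.1 + 1
      match d.get? p.2 with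
      | none => d.insert p.2 v
      | some old => if v < old then d.insert p.2 v else d) d) PySem.Dict.empty

-- total = 0; for c in word: t = cost.get(c); if t is None: total = -1; break; total += t
def wordCost (cost : PySem.Dict Char Int) (total : Int) : List Char → Int
  | [] => total
  | c :: rest =>
    match cost.get? c with
    | none => -1
    | some t => wordCost cost (total + t) rest

def solution_alt (keymap : List String) (targets : List String) : List Int :=
  let cost := buildCost keymap
  targets.foldl (fun answer word => answer ++ [wordCost cost 0 word.toList]) []

-- ===== PRECONDITION & SPEC =====
def Spec_solution (keymap : List String) (targets : List String) (out : List Int) : Prop := out = solution_alt keymap targets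
instance (keymap : List String) (targets : List String) (out : List Int) : Decidable (Spec_solution keymap targets out) := by unfold Spec_solution; infer_instance

-- ===== CLAIM (what is proved, stated in full; the proofs are below) =====
def Claim_equal_solution : Prop := ∀ (keymap : List String) (targets : List String), Dom_solution keymap targets → Spec_solution keymap targets (solution keymap targets)

-- ===== LEMMAS AND PROOFS =====

-- option-min: the running value of B's "c not in cost or v < cost[c]" update, seen through get?
def omin (o : Option Int) (v : Option Int) : Option Int :=
  match o, v with
  | none, v => v
  | some a, none => some a
  | some a, some b => some (min a b)

-- the cost contributed by one key for character x: first index + 1, if present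
def occ (x : Char) (key : String) : Option Int :=
  (PySem.List.index? key.toList x).map (fun i => (i : Int) + 1)

theorem buildCost_inner (x : Char) (cs : List Char) : ∀ (s : Int) (d : PySem.Dict Char Int),
    ((PySem.List.enumerate cs s).foldl (fun d p =>
      let v : Int := p.1 + 1
      match d.get? p.2 with
      | none => d.insert p.2 v
      | some old => if v < old then d.insert p.2 v else d) d).get? x
    = omin (d.get? x) ((PySem.List.index? cs x).map (fun i => s + (i : Int) + 1)) := by
  induction cs with
  | nil =>
    intro s d
    simp only [PySem.List.enumerate_nil, List.foldl_nil, PySem.List.index?_eq_idxOf?,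
      List.idxOf?_nil]
    cases d.get? x <;> rfl
  | cons c rest ih =>
    intro s d
    rw [PySem.List.enumerate_cons, List.foldl_cons, ih]
    by_cases hc : c = x
    · subst hc
      rw [PySem.List.index?_cons_self]
      cases hd : d.get? c with
      | none =>
        rw [PySem.Dict.get?_insert_self]
        cases hr : PySem.List.index? rest c <;> simp [omin] <;> omega
      | some old =>
        simp only [hd]
        by_cases hlt : s + 1 < old
        · rw [if_pos hlt, PySem.Dict.get?_insert_self]
          cases hr : PySem.List.index? rest c <;> simp [omin] <;> omega
        · rw [if_neg hlt, hd]
          cases hr : PySem.List.index? rest c <;> simp [omin] <;> omega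
          
    · rw [PySem.List.index?_cons_of_ne rest hc]
      have hstep : ∀ (d' : PySem.Dict Char Int),
          ((let v : Int := s + 1
            match d'.get? c with
            | none => d'.insert c v
            | some old => if v < old then d'.insert c v else d') : PySem.Dict Char Int).get? x
          = d'.get? x := by
        intro d'
        cases hd : d'.get? c with
        | none => simpa using PySem.Dict.get?_insert_of_ne d' (s+1) (fun h => hc h.symm)
        | some old =>
          by_cases hlt : s + 1 < old
          · simpa [hlt] using PySem.Dict.get?_insert_of_ne d' (s+1) (fun h => hc h.symm)
          · simp [hlt]
      rw [hstep]
      cases hr : PySem.List.index? rest x with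
      | none => rfl
      | some i =>
        cases d.get? x <;> simp [omin] <;> omega

theorem buildCost_get?_aux (x : Char) (keymap : List String) : ∀ (d : PySem.Dict Char Int),
    (keymap.foldl (fun d key =>
      (PySem.List.enumerate key.toList 0).foldl (fun d p =>
        let v : Int := p.1 + 1
        match d.get? p.2 with
        | none => d.insert p.2 v
        | some old => if v < old then d.insert p.2 v else d) d) d).get? x
    = keymap.foldl (fun o key => omin o (occ x key)) (d.get? x) := by
  induction keymap with
  | nil => intro d; rfl
  | cons key rest ih =>
    intro d
    rw [List.foldl_cons, List.foldl_cons, ih, buildCost_inner]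
    congr 1
    unfold occ
    cases PySem.List.index? key.toList x <;> simp

theorem buildCost_get? (keymap : List String) (x : Char) :
    (buildCost keymap).get? x = keymap.foldl (fun o key => omin o (occ x key)) none := by
  rw [buildCost, buildCost_get?_aux, PySem.Dict.get?_empty]

theorem foldl_omin_filterMap (x : Char) (keymap : List String) : ∀ (o : Option Int),
    keymap.foldl (fun o key => omin o (occ x key)) o
    = (keymap.filterMap (occ x)).foldl (fun o v => omin o (some v)) o := by
  induction keymap with
  | nil => intro o; rfl
  | cons key rest ih =>
    intro o
    rw [List.foldl_cons]
    cases h : occ x key with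
    | none =>
      rw [List.filterMap_cons_none h, ← ih]
      cases o <;> rfl
    | some v => rw [List.filterMap_cons_some h, List.foldl_cons, ih]

theorem foldl_omin_some (l : List Int) : ∀ (a : Int),
    l.foldl (fun o v => omin o (some v)) (some a) = some (l.foldl min a) := by
  induction l with
  | nil => intro a; rfl
  | cons v t ih => intro a; rw [List.foldl_cons, List.foldl_cons]; exact ih (min a v)

-- A's candidate list is exactly the filterMap of occ
theorem candidates_eq (x : Char) (keymap : List String) :
    (keymap.filter (fun key => key.toList.contains x)).map
      (fun key => ((PySem.List.index? key.toList x).getD 0 : Int) + 1)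
    = keymap.filterMap (occ x) := by
  induction keymap with
  | nil => rfl
  | cons key rest ih =>
    by_cases hm : x ∈ key.toList
    · cases hi : PySem.List.index? key.toList x with
      | none => exact absurd ((PySem.List.index?_eq_none_iff _ _).mp hi) (by simpa using hm)
      | some i =>
        rw [List.filter_cons_of_pos (by simpa using hm), List.map_cons,
          List.filterMap_cons_some (f := occ x)
            (by unfold occ; rw [hi]; rfl), ih, hi]
        rfl
    · rw [List.filter_cons_of_neg (by simpa using hm),
        List.filterMap_cons_none
          (by unfold occ; rw [(PySem.List.index?_eq_none_iff _ _).mpr hm]; rfl), ih]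

-- B's table lookup is A's min over the candidate list
theorem buildCost_eq_min? (keymap : List String) (x : Char) :
    (buildCost keymap).get? x
    = PySem.List.min? ((keymap.filter (fun key => key.toList.contains x)).map
        (fun key => ((PySem.List.index? key.toList x).getD 0 : Int) + 1)) (fun y => y) := by
  rw [buildCost_get?, foldl_omin_filterMap, candidates_eq]
  cases h : keymap.filterMap (occ x) with
  | nil => rfl
  | cons a t => rw [List.foldl_cons, PySem.List.min?_id_cons]; exact foldl_omin_some t a

theorem join_empty_eq_flatten (ls : List (List Char)) :
    PySem.Chars.join [] ls = ls.flatten := by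
  induction ls with
  | nil => rw [PySem.Chars.join_nil]; rfl
  | cons p rest ih =>
    cases rest with
    | nil => rw [PySem.Chars.join_singleton]; simp
    | cons q r => rw [PySem.Chars.join_cons_cons, ih]; simp

-- character feasibility: in the table iff in the joined keymap string
theorem contains_iff_mem_join (keymap : List String) (x : Char) :
    ((buildCost keymap).get? x).isSome ↔ x ∈ (PySem.Str.join "" keymap).toList := by
  rw [buildCost_eq_min?, PySem.Str.toList_join,
    show ("" : String).toList = [] from rfl, join_empty_eq_flatten,
    Option.isSome_iff_ne_none]
  rw [show ((PySem.List.min? ((keymap.filter (fun key => key.toList.contains x)).map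
        (fun key => ((PySem.List.index? key.toList x).getD 0 : Int) + 1)) (fun y => y)) ≠ none)
      ↔ ((keymap.filter (fun key => key.toList.contains x)).map
        (fun key => ((PySem.List.index? key.toList x).getD 0 : Int) + 1)) ≠ []
    from not_congr (PySem.List.min?_eq_none_iff _ _)]
  constructor
  · intro hne
    rcases List.exists_mem_of_ne_nil _ hne with ⟨y, hy⟩
    rcases List.mem_map.mp hy with ⟨key, hkeyf, _⟩
    have hk := List.mem_filter.mp hkeyf
    exact List.mem_flatten.mpr ⟨key.toList, List.mem_map.mpr ⟨key, hk.1, rfl⟩, by simpa using hk.2⟩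
  · intro h hnil
    rcases List.mem_flatten.mp h with ⟨l, hl, hx⟩
    rcases List.mem_map.mp hl with ⟨key, hkey, rfl⟩
    have hmem : key ∈ keymap.filter (fun key => key.toList.contains x) :=
      List.mem_filter.mpr ⟨hkey, by simpa using hx⟩
    have hin : ((PySem.List.index? key.toList x).getD 0 : Int) + 1
        ∈ (keymap.filter (fun key => key.toList.contains x)).map
          (fun key => ((PySem.List.index? key.toList x).getD 0 : Int) + 1) :=
      List.mem_map.mpr ⟨key, hmem, rfl⟩
    rw [hnil] at hin
    exact absurd hin List.not_mem_nil
theorem wordCost_all_some (cost : PySem.Dict Char Int) (w : List Char)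
    (h : ∀ c ∈ w, (cost.get? c).isSome) : ∀ t,
    wordCost cost t w = t + (w.map (fun c => (cost.get? c).getD 0)).sum := by
  induction w with
  | nil => intro t; simp [wordCost]
  | cons c rest ih =>
    intro t
    cases hc : cost.get? c with
    | none => exact absurd (hc ▸ h c (List.mem_cons_self)) (by simp)
    | some v =>
      simp only [wordCost, hc]
      rw [ih (fun c' hc' => h c' (List.mem_cons_of_mem _ hc'))]
      simp [hc]
      ring

theorem wordCost_missing (cost : PySem.Dict Char Int) (w : List Char)
    (h : ∃ c ∈ w, cost.get? c = none) : ∀ t, wordCost cost t w = -1 := by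
  induction w with
  | nil => exact absurd h (by simp)
  | cons c rest ih =>
    intro t
    cases hc : cost.get? c with
    | none => simp only [wordCost, hc]
    | some v =>
      simp only [wordCost, hc]
      rcases h with ⟨c', hc', hnone⟩
      rcases List.mem_cons.mp hc' with rfl | hmem
      · rw [hc] at hnone; exact absurd hnone (by simp)
      · exact ih ⟨c', hmem, hnone⟩ _

-- per-word agreement
theorem perWord (keymap : List String) (word : String) :
    (if PySem.Set.len (PySem.Set.diff (PySem.Set.ofList word.toList)
        (PySem.Set.ofList (PySem.Str.join "" keymap).toList)) ≠ 0 then (-1 : Int)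
     else word.toList.foldl (fun cnt w =>
        cnt + (PySem.List.min?
          ((keymap.filter (fun key => key.toList.contains w)).map
            (fun key => ((PySem.List.index? key.toList w).getD 0 : Int) + 1))
          (fun x => x)).getD 0) 0)
    = wordCost (buildCost keymap) 0 word.toList := by
  by_cases hall : ∀ c ∈ word.toList, c ∈ (PySem.Str.join "" keymap).toList
  · have hempty : PySem.Set.diff (PySem.Set.ofList word.toList)
        (PySem.Set.ofList (PySem.Str.join "" keymap).toList) = [] := by
      apply List.eq_nil_iff_forall_not_mem.mpr
      intro c hc
      have := (PySem.Set.mem_diff _ _ _).mp hc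
      exact this.2 ((PySem.Set.mem_ofList _ _).mpr
        (hall c ((PySem.Set.mem_ofList _ _).mp this.1)))
    have hlen : PySem.Set.len (PySem.Set.diff (PySem.Set.ofList word.toList)
        (PySem.Set.ofList (PySem.Str.join "" keymap).toList)) = 0 := by
      rw [hempty]; rfl
    rw [if_neg (fun hcon => hcon hlen)]
    rw [wordCost_all_some (buildCost keymap) word.toList
      (fun c hc => (contains_iff_mem_join keymap c).mpr (hall c hc)) 0]
    rw [PySem.List.foldl_add,
      List.map_congr_left (l := word.toList)
        (g := fun c => (((buildCost keymap).get? c).getD 0 : Int))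
        (fun c _ => by rw [← buildCost_eq_min? keymap c])]
  · push Not at hall
    rcases hall with ⟨c0, hc0w, hc0j⟩
    have hmem : c0 ∈ PySem.Set.diff (PySem.Set.ofList word.toList)
        (PySem.Set.ofList (PySem.Str.join "" keymap).toList) :=
      (PySem.Set.mem_diff _ _ _).mpr ⟨(PySem.Set.mem_ofList _ _).mpr hc0w,
        fun h => hc0j ((PySem.Set.mem_ofList _ _).mp h)⟩
    have hne : PySem.Set.diff (PySem.Set.ofList word.toList)
        (PySem.Set.ofList (PySem.Str.join "" keymap).toList) ≠ [] := by
      intro h; rw [h] at hmem; exact absurd hmem (by simp)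
    rw [if_pos (by
      cases h : PySem.Set.diff (PySem.Set.ofList word.toList)
          (PySem.Set.ofList (PySem.Str.join "" keymap).toList) with
      | nil => exact absurd h hne
      | cons a t => simp only [PySem.Set.len, List.length_cons]; omega)]
    rw [wordCost_missing (buildCost keymap) word.toList
      ⟨c0, hc0w, by
        have := (contains_iff_mem_join keymap c0).not.mpr hc0j
        cases h : (buildCost keymap).get? c0 with
        | none => rfl
        | some v => rw [h] at this; exact absurd (by simp) this⟩ 0]

-- ===== VERDICT (by name: the statement is the Claim_ definition above) =====
theorem solution_spec : Claim_equal_solution := by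
  intro keymap targets _
  unfold Spec_solution
  have hB : solution_alt keymap targets
      = targets.map (fun word => wordCost (buildCost keymap) 0 word.toList) := by
    unfold solution_alt
    rw [PySem.List.foldl_append_singleton_eq_map]
    simp
  rw [hB]
  unfold solution
  rw [PySem.List.foldl_congr_mem _ _
    (fun (answer : List Int) (word : String) =>
      answer ++ [wordCost (buildCost keymap) 0 word.toList]) _
    (by
      intro acc word _
      show _ = acc ++ [wordCost (buildCost keymap) 0 word.toList]
      rw [← perWord keymap word]
      split_ifs with h <;> rfl)]
  rw [PySem.List.foldl_append_singleton_eq_map]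
  simp
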